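-- pv_equiv track=rewrite | github.com/joedanields/A-C-CS | streamlit_app.py | count_with_at_most
-- ===== SOURCE A (Python) =====
-- import math
--
-- def nCr(n: int, r: int) -> int:
--     if r < 0 or r > n: return 0
--     return math.factorial(n) // (math.factorial(r) * math.factorial(n - r))
--
-- def count_with_at_most(group_sizes, maxs, r):
--     if len(group_sizes) != len(maxs): raise ValueError("maxs length mismatch")
--     def bounded_compositions(total_rem, bounds):
--         if len(bounds) == 1:
--             if 0 <= total_rem <= bounds[0]:
--                 yield (total_rem,)
--             return
--         b0 = bounds[0]
--         for x0 in range(0, min(b0, total_rem) + 1):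
--             for rest in bounded_compositions(total_rem - x0, bounds[1:]):
--                 yield (x0,) + rest
--     caps = [min(g, m) for g, m in zip(group_sizes, maxs)]
--     total = 0
--     for picks in bounded_compositions(r, caps):
--         ways = 1
--         for g, e in zip(group_sizes, picks):
--             ways *= nCr(g, e)
--         total += ways
--     return total
-- ===== SOURCE B (Python) =====
-- import math
--
-- def count_with_at_most(group_sizes, maxs, r):
--     if len(group_sizes) != len(maxs):
--         raise ValueError("maxs length mismatch")
--     caps = [min(g, m) for g, m in zip(group_sizes, maxs)]
--     if r < 0 or r > sum(caps) or any(c < 0 for c in caps):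
--         return 0
--     # Suffix DP over the groups, right to left.  T[t - lo] = weighted number of
--     # bounded pick-vectors for the processed suffix summing exactly to t, kept
--     # only on the window [lo, r] of remainders that the unprocessed prefix can
--     # still reach (lo = max(0, r - sum of unprocessed caps)); hi = the largest
--     # sum the processed suffix can produce, so coefficients above hi are zero.
--     rem = sum(caps)
--     lo, hi = 0, 0
--     T = [1] + [0] * r
--     for g, cap in reversed(list(zip(group_sizes, caps))):
--         rem -= cap
--         lo_new = max(0, r - rem)
--         T = [sum(math.comb(g, e) * T[t - e - lo]
--                  for e in range(max(0, t - hi), min(cap, t) + 1))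
--              for t in range(lo_new, r + 1)]
--         lo, hi = lo_new, min(hi + cap, r)
--     return T[r - lo]
-- ===== Notes on version B (the rewrite author's own statement) =====
-- stated objective: alternative
-- what changed: Replaced the recursive enumeration of all bounded compositions (exponential in the number of groups) by a window-bounded suffix dynamic program that convolves per-group binomial weights, keeping only the coefficients reachable by the remaining groups.
import Mathlib
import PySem

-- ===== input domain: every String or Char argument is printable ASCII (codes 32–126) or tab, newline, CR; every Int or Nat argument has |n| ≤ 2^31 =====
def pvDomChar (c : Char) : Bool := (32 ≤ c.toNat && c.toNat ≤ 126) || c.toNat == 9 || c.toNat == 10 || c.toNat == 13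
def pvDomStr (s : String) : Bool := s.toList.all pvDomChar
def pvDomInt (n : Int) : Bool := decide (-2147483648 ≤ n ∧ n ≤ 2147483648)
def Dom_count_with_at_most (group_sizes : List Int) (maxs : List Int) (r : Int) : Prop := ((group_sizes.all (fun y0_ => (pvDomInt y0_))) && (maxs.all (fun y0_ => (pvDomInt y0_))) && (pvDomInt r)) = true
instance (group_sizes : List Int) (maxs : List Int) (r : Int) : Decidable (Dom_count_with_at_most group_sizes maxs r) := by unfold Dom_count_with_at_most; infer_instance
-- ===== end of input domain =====

-- B replaces A's enumeration of all bounded compositions by a window-bounded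
-- suffix dynamic program over per-group binomial weights (objective: alternative).


-- ===== PORT A =====
-- nCr: A's guard ensures both factorial arguments are nonnegative, so toNat and
-- Nat division are exact (Python // on nonnegative operands = Nat division).
def nCr (n : Int) (r : Int) : Int :=
  if r < 0 ∨ r > n then 0
  else ((n.toNat.factorial / (r.toNat.factorial * (n - r).toNat.factorial) : Nat) : Int)

-- the generator bounded_compositions, as the list of tuples it yields, in order.
-- A raises IndexError on empty bounds (excluded by Pre_); the [] case is arbitrary.
def bcomp (total_rem : Int) (bounds : List Int) : List (List Int) :=
  match bounds with
  | [] => []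
  | [b] => if 0 ≤ total_rem ∧ total_rem ≤ b then [[total_rem]] else []
  | b0 :: b1 :: bs =>
      (PySem.List.pyRange 0 (min b0 total_rem + 1) 1).flatMap
        (fun x0 => (bcomp (total_rem - x0) (b1 :: bs)).map (fun rest => x0 :: rest))
termination_by bounds.length
decreasing_by simp

def count_with_at_most (group_sizes : List Int) (maxs : List Int) (r : Int) : Int :=
  if group_sizes.length ≠ maxs.length then 0  -- Python raises ValueError here; excluded by Pre_
  else
    let caps := List.zipWith (fun g m => min g m) group_sizes maxs
    (bcomp r caps).foldl
      (fun total picks =>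
        total + (List.zip group_sizes picks).foldl (fun ways p => ways * nCr p.1 p.2) 1) 0

-- ===== PORT B =====
-- math.comb(g, e): B only calls it with 0 <= e <= g, where toNat + Nat.choose is exact.
def combB (g : Int) (e : Int) : Int := (g.toNat.choose e.toNat : Int)

-- one iteration of B's loop over a group (g, cap) = p; state st = (rem, lo, hi, T).
-- T[t-e-lo] and, below, T[r-lo]: B always indexes with a nonnegative in-range
-- offset, where getD (.).toNat is exact.
def bstep (r : Int) (st : Int × Int × Int × List Int) (p : Int × Int) :
    Int × Int × Int × List Int :=
  let rem := st.1 - p.2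
  let lo_new := max 0 (r - rem)
  let T := (PySem.List.pyRange lo_new (r + 1) 1).map (fun t =>
    ((PySem.List.pyRange (max 0 (t - st.2.2.1)) (min p.2 t + 1) 1).map
      (fun e => combB p.1 e * st.2.2.2.getD (t - e - st.2.1).toNat 0)).sum)
  (rem, lo_new, min (st.2.2.1 + p.2) r, T)

def count_with_at_most_alt (group_sizes : List Int) (maxs : List Int) (r : Int) : Int :=
  if group_sizes.length ≠ maxs.length then 0  -- B raises ValueError here; excluded by Pre_
  else
    let caps := List.zipWith (fun g m => min g m) group_sizes maxs
    if r < 0 ∨ caps.sum < r ∨ caps.any (fun c => decide (c < 0)) = true then 0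
    else
      let st := ((List.zip group_sizes caps).reverse).foldl (bstep r)
        (caps.sum, 0, 0, (1 : Int) :: List.replicate r.toNat 0)
      st.2.2.2.getD (r - st.2.1).toNat 0

-- ===== PRECONDITION & SPEC =====
-- Pre_ excludes exactly the inputs where A raises: mismatched lengths (ValueError)
-- and empty group lists (IndexError in bounded_compositions).
def Pre_count_with_at_most (group_sizes : List Int) (maxs : List Int) (r : Int) : Prop :=
  group_sizes.length = maxs.length ∧ group_sizes ≠ []
instance (group_sizes : List Int) (maxs : List Int) (r : Int) : Decidable (Pre_count_with_at_most group_sizes maxs r) := by unfold Pre_count_with_at_most; infer_instance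

def pvWitness_count_with_at_most : List Int × List Int × Int := ([2, 3], [1, 5], 2)

def Spec_count_with_at_most (group_sizes : List Int) (maxs : List Int) (r : Int) (out : Int) : Prop := out = count_with_at_most_alt group_sizes maxs r
instance (group_sizes : List Int) (maxs : List Int) (r : Int) (out : Int) : Decidable (Spec_count_with_at_most group_sizes maxs r out) := by unfold Spec_count_with_at_most; infer_instance

-- ===== CLAIM (what is proved, stated in full; the proofs are below) =====
def Claim_equal_count_with_at_most : Prop := ∀ (group_sizes : List Int) (maxs : List Int) (r : Int), Dom_count_with_at_most group_sizes maxs r → Pre_count_with_at_most group_sizes maxs r → Spec_count_with_at_most group_sizes maxs r (count_with_at_most group_sizes maxs r)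
-- ===== LEMMAS AND PROOFS =====

-- the common mathematical value: weighted count of bounded pick-vectors for the
-- pair list (group size, cap) summing exactly to t.
def specF (t : Int) (ps : List (Int × Int)) : Int :=
  match ps with
  | [] => if t = 0 then 1 else 0
  | p :: rest =>
      ((PySem.List.pyRange 0 (min p.2 t + 1) 1).map
        (fun e => combB p.1 e * specF (t - e) rest)).sum
termination_by ps.length
decreasing_by simp

theorem nCr_eq_combB (g e : Int) (h0 : 0 ≤ e) (h1 : e ≤ g) : nCr g e = combB g e := by
  unfold nCr combB
  have h : (g - e).toNat = g.toNat - e.toNat := by omega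
  rw [if_neg (by omega), h,
    Nat.choose_eq_factorial_div_factorial (by omega : e.toNat ≤ g.toNat)]

theorem range_delta (n : ℕ) (t : Int) (f : Int → Int) :
    ((List.range n).map (fun k : ℕ => f (k : Int) * (if t - (k : Int) = 0 then 1 else 0))).sum
      = if 0 ≤ t ∧ t < (n : Int) then f t else 0 := by
  induction n with
  | zero =>
    simp only [List.range_zero, List.map_nil, List.sum_nil]
    rw [if_neg (by omega)]
  | succ n ih =>
    rw [List.range_succ, List.map_append, List.sum_append, ih]
    simp only [List.map_cons, List.map_nil, List.sum_cons, List.sum_nil]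
    by_cases ht : t = (n : Int)
    · subst ht
      rw [if_neg (by omega),
        if_pos (show (0:Int) ≤ (n : Int) ∧ (n : Int) < ((n + 1 : ℕ) : Int) by
          constructor <;> omega)]
      simp
    · rw [if_neg (by omega : ¬ t - (n : Int) = 0)]
      have hiff : (0 ≤ t ∧ t < (n : Int)) ↔ (0 ≤ t ∧ t < ((n + 1 : ℕ) : Int)) := by omega
      simp [hiff]

theorem delta_sum (t c : Int) (f : Int → Int) :
    ((PySem.List.pyRange 0 (min c t + 1) 1).map
      (fun e => f e * (if t - e = 0 then 1 else 0))).sum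
      = if 0 ≤ t ∧ t ≤ c then f t else 0 := by
  by_cases h : 0 < min c t + 1
  · rw [PySem.List.pyRange_one, List.map_map]
    simp only [Function.comp_def, zero_add, sub_zero]
    rw [range_delta]
    have hiff : (0 ≤ t ∧ t < (((min c t + 1).toNat : ℕ) : Int)) ↔ (0 ≤ t ∧ t ≤ c) := by omega
    rw [if_congr hiff rfl rfl]
  · rw [PySem.List.pyRange_one_eq_nil (by omega)]
    simp only [List.map_nil, List.sum_nil]
    rw [if_neg (by omega)]

theorem foldl_mul (f : (Int × Int) → Int) (l : List (Int × Int)) (a : Int) :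
    l.foldl (fun w q => w * f q) a = a * l.foldl (fun w q => w * f q) 1 := by
  induction l generalizing a with
  | nil => simp
  | cons p l ih =>
    simp only [List.foldl_cons]
    rw [ih (a * f p), ih (1 * f p)]
    ring

theorem A_eq_spec (ps : List (Int × Int)) (hne : ps ≠ [])
    (hle : ∀ p ∈ ps, p.2 ≤ p.1) (t : Int) :
    (bcomp t (ps.map Prod.snd)).foldl
      (fun total picks =>
        total + (List.zip (ps.map Prod.fst) picks).foldl
          (fun ways p => ways * nCr p.1 p.2) 1) 0 = specF t ps := by
  induction ps generalizing t with
  | nil => exact absurd rfl hne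
  | cons p ps ih =>
    cases ps with
    | nil =>
      -- singleton group: bcomp's base case vs the delta sum of specF
      simp only [List.map_cons, List.map_nil, bcomp]
      rw [specF]
      simp only [specF]
      rw [delta_sum t p.2 (fun e => combB p.1 e)]
      by_cases hc : 0 ≤ t ∧ t ≤ p.2
      · rw [if_pos hc, if_pos hc]
        simp only [List.foldl_cons, List.zip_cons_cons, List.zip_nil_right, List.foldl_nil,
          List.foldl_cons]
        rw [nCr_eq_combB p.1 t hc.1 (le_trans hc.2 (hle p (by simp)))]
        ring
      · rw [if_neg hc, if_neg hc]
        simp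
    | cons q rest =>
      have hqne : (q :: rest) ≠ [] := by simp
      have hqle : ∀ x ∈ (q :: rest), x.2 ≤ x.1 := fun x hx => hle x (by simp [hx])
      simp only [List.map_cons]
      rw [show bcomp t (p.2 :: q.2 :: rest.map Prod.snd)
            = (PySem.List.pyRange 0 (min p.2 t + 1) 1).flatMap
                (fun x0 => (bcomp (t - x0) (q.2 :: rest.map Prod.snd)).map
                  (fun r' => x0 :: r')) from by rw [bcomp]]
      rw [PySem.List.foldl_add, zero_add, List.map_flatMap]
      rw [List.flatMap_def, List.sum_flatten, List.map_map]
      rw [specF]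
      refine congrArg List.sum (List.map_congr_left ?_)
      intro x0 hx0
      rw [PySem.List.mem_pyRange_one] at hx0
      show ((bcomp (t - x0) (q.2 :: rest.map Prod.snd)).map (fun r' => x0 :: r')
          |>.map (fun picks => (List.zip (p.1 :: q.1 :: rest.map Prod.fst) picks).foldl
            (fun ways y => ways * nCr y.1 y.2) 1)).sum
        = combB p.1 x0 * specF (t - x0) (q :: rest)
      rw [List.map_map]
      rw [show ((fun picks => (List.zip (p.1 :: q.1 :: rest.map Prod.fst) picks).foldl
              (fun ways y => ways * nCr y.1 y.2) 1) ∘ (fun r' => x0 :: r'))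
            = (fun picks => nCr p.1 x0 * (List.zip (q.1 :: rest.map Prod.fst) picks).foldl
                (fun ways y => ways * nCr y.1 y.2) 1) from funext (fun picks => by
          simp only [Function.comp_apply, List.zip_cons_cons, List.foldl_cons]
          rw [foldl_mul (fun y => nCr y.1 y.2) _ (1 * nCr p.1 x0)]
          ring)]
      rw [List.sum_map_mul_left]
      have hih := ih hqne hqle (t - x0)
      simp only [List.map_cons] at hih
      rw [PySem.List.foldl_add, zero_add] at hih
      rw [hih, nCr_eq_combB p.1 x0 (by omega)
        (le_trans (by omega : x0 ≤ p.2) (hle p (by simp)))]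

theorem specF_neg (t : Int) (ps : List (Int × Int)) (ht : t < 0) : specF t ps = 0 := by
  cases ps with
  | nil => rw [specF]; rw [if_neg (by omega)]
  | cons p rest =>
    rw [specF]
    rw [PySem.List.pyRange_one_eq_nil (by omega)]
    simp

theorem base_vec (r : Int) (hr : 0 ≤ r) :
    (1 : Int) :: List.replicate r.toNat 0
      = (PySem.List.pyRange 0 (r + 1) 1).map (fun t => specF t []) := by
  rw [PySem.List.pyRange_one_cons (by omega : (0:Int) < r + 1), List.map_cons]
  rw [show specF 0 [] = 1 from by simp [specF]]
  congr 1
  symm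
  rw [List.eq_replicate_iff]
  refine ⟨by rw [List.length_map, PySem.List.length_pyRange_one]; omega, ?_⟩
  intro b hb
  obtain ⟨x, hx, hxb⟩ := List.mem_map.mp hb
  rw [PySem.List.mem_pyRange_one] at hx
  rw [← hxb, specF]
  rw [if_neg (by omega)]

theorem getD_map_pyRange_off (f : Int → Int) (a b i : Int) (h0 : a ≤ i) (h1 : i < b) :
    ((PySem.List.pyRange a b 1).map f).getD (i - a).toNat 0 = f i := by
  rw [← PySem.List.pyGetD_of_nonneg ((PySem.List.pyRange a b 1).map f) 0
      (by omega : (0:Int) ≤ i - a)]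
  rw [show (i - a : Int) = (((i - a).toNat : ℕ) : Int) by omega]
  rw [PySem.List.pyGetD_map_pyRange_one f a b (i - a).toNat 0 (by omega)]
  congr 1
  omega

theorem specF_gt_sum (ps : List (Int × Int)) : ∀ t : Int,
    (ps.map Prod.snd).sum < t → specF t ps = 0 := by
  induction ps with
  | nil =>
    intro t ht
    simp only [List.map_nil, List.sum_nil] at ht
    rw [specF, if_neg (by omega)]
  | cons p rest ih =>
    intro t ht
    simp only [List.map_cons, List.sum_cons] at ht
    rw [specF]
    rw [List.map_congr_left (g := fun _ => (0 : Int)) (fun e he => by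
      rw [PySem.List.mem_pyRange_one] at he
      rw [ih (t - e) (by omega)]
      ring)]
    simp

theorem specF_neg_cap (ps : List (Int × Int)) : ∀ t : Int,
    (∃ p ∈ ps, p.2 < 0) → specF t ps = 0 := by
  induction ps with
  | nil => rintro t ⟨p, hp, -⟩; simp at hp
  | cons p rest ih =>
    rintro t ⟨q, hq, hqneg⟩
    rw [specF]
    rcases List.mem_cons.mp hq with h | h
    · rw [h] at hqneg
      rw [PySem.List.pyRange_one_eq_nil (by
        have := min_le_left p.2 t
        omega)]
      simp
    · rw [List.map_congr_left (g := fun _ => (0 : Int)) (fun e he => by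
        rw [ih (t - e) ⟨q, h, hqneg⟩]
        ring)]
      simp

theorem zip_zipWith_min (gs ms : List Int) :
    List.zip gs (List.zipWith (fun g m => min g m) gs ms)
      = (List.zip gs ms).map (fun p => (p.1, min p.1 p.2)) := by
  induction gs generalizing ms with
  | nil => simp
  | cons g gs ih => cases ms <;> simp [ih]

theorem B_inv (r : Int) (hr : 0 ≤ r) (l : List (Int × Int)) :
    ∀ R : Int, 0 ≤ R → (∀ p ∈ l, 0 ≤ p.2 ∧ p.2 ≤ p.1) →
      r ≤ R + (l.map Prod.snd).sum →
      l.reverse.foldl (bstep r)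
        (R + (l.map Prod.snd).sum, 0, 0, (1 : Int) :: List.replicate r.toNat 0)
      = (R, max 0 (r - R), min (l.map Prod.snd).sum r,
         (PySem.List.pyRange (max 0 (r - R)) (r + 1) 1).map (fun t => specF t l)) := by
  induction l with
  | nil =>
    intro R hR _ hle
    simp only [List.map_nil, List.sum_nil, add_zero] at hle
    simp only [List.map_nil, List.sum_nil, List.reverse_nil, List.foldl_nil, add_zero]
    rw [show max 0 (r - R) = 0 by omega, show min 0 r = 0 by omega, base_vec r hr]
  | cons p l ih =>
    intro R hR hcaps hle
    have hp := hcaps p (by simp)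
    have hsum : ((p :: l).map Prod.snd).sum = p.2 + (l.map Prod.snd).sum := by simp
    rw [List.reverse_cons, List.foldl_append, List.foldl_cons, List.foldl_nil]
    rw [show R + ((p :: l).map Prod.snd).sum = (R + p.2) + (l.map Prod.snd).sum by
      rw [hsum]; ring]
    rw [ih (R + p.2) (by omega) (fun q hq => hcaps q (by simp [hq]))
      (by rw [hsum] at hle; omega)]
    simp only [bstep]
    rw [show R + p.2 - p.2 = R by ring]
    refine congrArg₂ Prod.mk rfl (congrArg₂ Prod.mk rfl (congrArg₂ Prod.mk ?_ ?_))
    · rw [hsum]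
      have h1 := hp.1
      omega
    · refine List.map_congr_left ?_
      intro t ht
      rw [PySem.List.mem_pyRange_one] at ht
      -- rewrite the window lookups into specF values
      have hlook : ∀ e : Int, max 0 (t - min ((l.map Prod.snd).sum) r) ≤ e →
          e < min p.2 t + 1 →
          ((PySem.List.pyRange (max 0 (r - (R + p.2))) (r + 1) 1).map
            (fun u => specF u l)).getD (t - e - max 0 (r - (R + p.2))).toNat 0
            = specF (t - e) l := by
        intro e he1 he2
        exact getD_map_pyRange_off (fun u => specF u l) _ _ (t - e)
          (by have := min_le_right p.2 t; omega) (by omega)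
      have hmapeq :
          (PySem.List.pyRange (max 0 (t - min ((l.map Prod.snd).sum) r))
              (min p.2 t + 1) 1).map
            (fun e => combB p.1 e *
              ((PySem.List.pyRange (max 0 (r - (R + p.2))) (r + 1) 1).map
                (fun u => specF u l)).getD (t - e - max 0 (r - (R + p.2))).toNat 0)
          = (PySem.List.pyRange (max 0 (t - min ((l.map Prod.snd).sum) r))
              (min p.2 t + 1) 1).map (fun e => combB p.1 e * specF (t - e) l) :=
        List.map_congr_left (fun e he => by
          rw [PySem.List.mem_pyRange_one] at he
          rw [hlook e he.1 he.2])
      rw [hmapeq, specF]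
      -- the dropped low part of the range contributes zero
      by_cases hm : max 0 (t - min ((l.map Prod.snd).sum) r) ≤ min p.2 t + 1
      · rw [PySem.List.pyRange_one_append 0
          (max 0 (t - min ((l.map Prod.snd).sum) r)) (min p.2 t + 1) (by omega) hm]
        rw [List.map_append, List.sum_append]
        have hz1 : ((PySem.List.pyRange 0
            (max 0 (t - min ((l.map Prod.snd).sum) r)) 1).map
              (fun e => combB p.1 e * specF (t - e) l)).sum = 0 := by
          refine List.sum_eq_zero ?_
          intro x hx
          obtain ⟨e, he, hex⟩ := List.mem_map.mp hx
          rw [PySem.List.mem_pyRange_one] at he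
          rw [← hex, specF_gt_sum l (t - e) (by omega)]
          ring
        rw [hz1, zero_add]
      · rw [PySem.List.pyRange_one_eq_nil (by omega)]
        simp only [List.map_nil, List.sum_nil]
        refine (List.sum_eq_zero ?_).symm
        intro x hx
        obtain ⟨e, he, hex⟩ := List.mem_map.mp hx
        rw [PySem.List.mem_pyRange_one] at he
        rw [← hex, specF_gt_sum l (t - e) (by omega)]
        ring

theorem zipWith_min_eq (gs ms : List Int) :
    List.zipWith (fun g m => min g m) gs ms
      = (List.zip gs ms).map (fun p => min p.1 p.2) := by
  induction gs generalizing ms with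
  | nil => simp
  | cons g gs ih => cases ms <;> simp [ih]

-- ===== VERDICT (by name: the statement is the Claim_ definition above) =====
theorem count_with_at_most_spec : Claim_equal_count_with_at_most := by
  intro gs ms r _ hpre
  obtain ⟨hlen, hne⟩ := hpre
  unfold Spec_count_with_at_most count_with_at_most count_with_at_most_alt
  rw [if_neg (by omega), if_neg (by omega)]
  set ps := (List.zip gs ms).map (fun p => (p.1, min p.1 p.2)) with hps
  have hfst : ps.map Prod.fst = gs := by
    rw [hps, List.map_map]
    exact List.map_fst_zip (le_of_eq hlen)
  have hsnd : ps.map Prod.snd = List.zipWith (fun g m => min g m) gs ms := by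
    rw [hps, List.map_map, zipWith_min_eq]
    rfl
  have hpne : ps ≠ [] := by
    cases gs with
    | nil => exact absurd rfl hne
    | cons g gs' =>
      cases ms with
      | nil => simp at hlen
      | cons m ms' => simp [hps]
  have hle : ∀ p ∈ ps, p.2 ≤ p.1 := by
    intro p hp
    obtain ⟨q, _, hq⟩ := List.mem_map.mp hp
    rw [← hq]
    exact min_le_left _ _
  have hA : (bcomp r (List.zipWith (fun g m => min g m) gs ms)).foldl
      (fun total picks =>
        total + (List.zip gs picks).foldl (fun ways p => ways * nCr p.1 p.2) 1) 0
      = specF r ps := by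
    rw [← hsnd, ← hfst]
    exact A_eq_spec ps hpne hle r
  rw [hA]
  by_cases hz : r < 0 ∨ (List.zipWith (fun g m => min g m) gs ms).sum < r ∨
      (List.zipWith (fun g m => min g m) gs ms).any (fun c => decide (c < 0)) = true
  · rw [if_pos hz]
    rcases hz with h | h | h
    · exact specF_neg r ps h
    · exact specF_gt_sum ps r (by rw [hsnd]; exact h)
    · refine specF_neg_cap ps r ?_
      obtain ⟨c, hc, hcneg⟩ := List.any_eq_true.mp h
      rw [← hsnd] at hc
      obtain ⟨p, hp, hpc⟩ := List.mem_map.mp hc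
      exact ⟨p, hp, by rw [hpc]; exact of_decide_eq_true hcneg⟩
  · rw [if_neg hz]
    push_neg at hz
    obtain ⟨hr0, hrs, hnocap⟩ := hz
    have hcapsnn : ∀ p ∈ ps, 0 ≤ p.2 ∧ p.2 ≤ p.1 := by
      intro p hp
      refine ⟨?_, hle p hp⟩
      by_contra hneg
      have : p.2 ∈ ps.map Prod.snd := List.mem_map.mpr ⟨p, hp, rfl⟩
      rw [hsnd] at this
      exact absurd (List.any_eq_true.mpr ⟨p.2, this, decide_eq_true (by omega)⟩) hnocap
    rw [zip_zipWith_min, ← hps, ← hsnd]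
    rw [show (ps.map Prod.snd).sum = 0 + (ps.map Prod.snd).sum by ring]
    rw [B_inv r (by omega) ps 0 le_rfl hcapsnn (by rw [← hsnd] at hrs; omega)]
    rw [getD_map_pyRange_off (fun t => specF t ps) (max 0 (r - 0)) (r + 1) r
      (by omega) (by omega)]
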